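-- pv_equiv track=rewrite | github.com/zedarvates/StoryCore-Engine | test_cleanup/value_assessment/unique_coverage.py | _calculate_unique_coverage
-- ===== SOURCE A (Python) =====
-- from typing import Dict, List, Set
--
-- def _calculate_unique_coverage(
--     test_name: str,
--     test_coverage_map: Dict[str, Dict[str, Set[int]]]
-- ) -> int:
--     """
--     Calculate the number of unique lines covered only by this test.
--
--     Args:
--         test_name: Name of the test to analyze
--         test_coverage_map: Dictionary mapping test names to their coverage data
--
--     Returns:
--         Number of lines uniquely covered by this test
--     """
--     if test_name not in test_coverage_map:
--         return 0
--
--     test_coverage = test_coverage_map[test_name]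
--
--     # Get all lines covered by this test
--     test_lines = set()
--     for file_path, lines in test_coverage.items():
--         for line_num in lines:
--             test_lines.add(f"{file_path}:{line_num}")
--
--     # Get all lines covered by other tests
--     other_lines = set()
--     for other_test, coverage_data in test_coverage_map.items():
--         if other_test != test_name:
--             for file_path, lines in coverage_data.items():
--                 for line_num in lines:
--                     other_lines.add(f"{file_path}:{line_num}")
--
--     # Calculate unique coverage
--     unique_lines = test_lines - other_lines
--
--     return len(unique_lines)
-- ===== SOURCE B (Python) =====
-- def _calculate_unique_coverage(test_name, test_coverage_map):
--     """Index-first: one frequency table over per-test key sets, then one filter pass."""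
--     if test_name not in test_coverage_map:
--         return 0
--     freq = {}
--     for coverage in test_coverage_map.values():
--         for key in {f"{fp}:{ln}" for fp, lines in coverage.items() for ln in lines}:
--             freq[key] = freq.get(key, 0) + 1
--     this_keys = {f"{fp}:{ln}" for fp, lines in test_coverage_map[test_name].items()
--                  for ln in lines}
--     return sum(1 for key in this_keys if freq[key] == 1)
-- ===== Notes on version B (the rewrite author's own statement) =====
-- stated objective: alternative
-- what changed: Replaces A's two-sets-and-difference strategy (build this test's key set, build the union of all other tests' keys, subtract) by an index-first strategy: one frequency table counting for each coverage key how many tests cover it, then a single filter pass counting this test's keys with frequency exactly 1.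
import Mathlib
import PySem

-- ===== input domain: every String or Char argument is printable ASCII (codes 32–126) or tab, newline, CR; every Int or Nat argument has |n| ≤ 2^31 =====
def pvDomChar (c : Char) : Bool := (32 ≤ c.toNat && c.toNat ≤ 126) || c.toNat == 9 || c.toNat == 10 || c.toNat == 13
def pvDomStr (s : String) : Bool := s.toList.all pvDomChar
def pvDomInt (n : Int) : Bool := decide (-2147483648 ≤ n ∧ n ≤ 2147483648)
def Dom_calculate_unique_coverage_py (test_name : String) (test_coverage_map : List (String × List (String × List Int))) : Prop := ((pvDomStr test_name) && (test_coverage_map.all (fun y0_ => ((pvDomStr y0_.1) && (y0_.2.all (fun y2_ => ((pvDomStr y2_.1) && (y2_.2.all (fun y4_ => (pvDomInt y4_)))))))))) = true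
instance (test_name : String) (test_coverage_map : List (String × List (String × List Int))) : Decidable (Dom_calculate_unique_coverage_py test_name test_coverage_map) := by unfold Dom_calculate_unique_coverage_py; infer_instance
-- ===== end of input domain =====

-- B replaces A's two-sets-and-difference strategy by one frequency table over per-test key
-- sets followed by a single filter pass over this test's keys (objective: alternative).

-- f"{file_path}:{line_num}" (both Pythons build this same key string)
def pvKey (fp : String) (ln : Int) : String := fp ++ ":" ++ PySem.Int.toStr ln

-- ===== PORT A =====
def calculate_unique_coverage_py (test_name : String) (test_coverage_map : List (String × List (String × List Int))) : Int :=
  match (PySem.Dict.mk test_coverage_map).get? test_name with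
  | none => 0                                  -- `if test_name not in test_coverage_map: return 0`
  | some test_coverage =>
    -- test_lines: set of this test's keys, built by nested add-loops
    let test_lines : PySem.Set String :=
      test_coverage.foldl (fun s fl =>
        fl.2.foldl (fun s ln => s.add (pvKey fl.1 ln)) s) PySem.Set.empty
    -- other_lines: keys of every other test, built by nested add-loops
    let other_lines : PySem.Set String :=
      test_coverage_map.foldl (fun s tc =>
        if tc.1 ≠ test_name then
          tc.2.foldl (fun s fl => fl.2.foldl (fun s ln => s.add (pvKey fl.1 ln)) s) s
        else s) PySem.Set.empty
    PySem.Set.len (PySem.Set.diff test_lines other_lines)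

-- ===== PORT B =====
-- the set comprehension {f"{fp}:{ln}" for fp, lines in coverage.items() for ln in lines}
def pvKeySet (coverage : List (String × List Int)) : PySem.Set String :=
  PySem.Set.ofList (coverage.flatMap (fun fl => fl.2.map (fun ln => pvKey fl.1 ln)))

def calculate_unique_coverage_py_alt (test_name : String) (test_coverage_map : List (String × List (String × List Int))) : Int :=
  match (PySem.Dict.mk test_coverage_map).get? test_name with
  | none => 0                                  -- `if test_name not in test_coverage_map: return 0`
  | some cov =>
    -- freq[key] = number of tests whose key set contains key
    let freq : PySem.Dict String Int :=
      test_coverage_map.foldl (fun d tc =>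
        (pvKeySet tc.2).foldl (fun d k => d.insert k (d.getD k 0 + 1)) d) PySem.Dict.empty
    -- sum(1 for key in this_keys if freq[key] == 1)  (a 0/1-sum is countP)
    ((pvKeySet cov).countP (fun k => freq.getD k 0 == 1) : Int)

-- ===== PRECONDITION & SPEC =====
-- Pre_ excludes association lists whose outer (test-name) keys repeat: a Python dict has
-- unique keys, so such lists do not represent any input A is ever called with.
def Pre_calculate_unique_coverage_py (test_name : String) (test_coverage_map : List (String × List (String × List Int))) : Prop :=
  (test_coverage_map.map Prod.fst).Nodup
instance (test_name : String) (test_coverage_map : List (String × List (String × List Int))) : Decidable (Pre_calculate_unique_coverage_py test_name test_coverage_map) := by unfold Pre_calculate_unique_coverage_py; infer_instance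

def pvWitness_calculate_unique_coverage_py : String × (List (String × List (String × List Int))) :=
  ("t", [("t", [("f", [1, 2])]), ("u", [("f", [2])])])

def Spec_calculate_unique_coverage_py (test_name : String) (test_coverage_map : List (String × List (String × List Int))) (out : Int) : Prop := out = calculate_unique_coverage_py_alt test_name test_coverage_map
instance (test_name : String) (test_coverage_map : List (String × List (String × List Int))) (out : Int) : Decidable (Spec_calculate_unique_coverage_py test_name test_coverage_map out) := by unfold Spec_calculate_unique_coverage_py; infer_instance

-- ===== CLAIM (what is proved, stated in full; the proofs are below) =====
def Claim_equal_calculate_unique_coverage_py : Prop := ∀ (test_name : String) (test_coverage_map : List (String × List (String × List Int))), Dom_calculate_unique_coverage_py test_name test_coverage_map → Pre_calculate_unique_coverage_py test_name test_coverage_map → Spec_calculate_unique_coverage_py test_name test_coverage_map (calculate_unique_coverage_py test_name test_coverage_map)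

-- ===== LEMMAS AND PROOFS =====

-- the flat list of keys of one test's coverage
def pvKeys (coverage : List (String × List Int)) : List String :=
  coverage.flatMap (fun fl => fl.2.map (fun ln => pvKey fl.1 ln))

-- A's nested add-loop over one coverage dict is a fold of Set.add over the flat key list
lemma pv_addloop_eq (cov : List (String × List Int)) (s : PySem.Set String) :
    cov.foldl (fun s fl => fl.2.foldl (fun s ln => s.add (pvKey fl.1 ln)) s) s
      = (pvKeys cov).foldl PySem.Set.add s := by
  induction cov generalizing s with
  | nil => rfl
  | cons fl rest ih =>
      simp only [pvKeys, List.flatMap_cons, List.foldl_append, List.foldl_cons, List.foldl_map]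
      rw [ih]; rfl

lemma pv_mem_foldl_add (xs : List String) (s : PySem.Set String) (k : String) :
    k ∈ xs.foldl PySem.Set.add s ↔ k ∈ s ∨ k ∈ xs := by
  induction xs generalizing s with
  | nil => simp
  | cons x xs ih => simp [ih, PySem.Set.mem_add]; tauto

-- membership in A's other_lines accumulator
lemma pv_mem_other (tn : String) (m : List (String × List (String × List Int)))
    (s : PySem.Set String) (k : String) :
    k ∈ m.foldl (fun s tc =>
        if tc.1 ≠ tn then
          tc.2.foldl (fun s fl => fl.2.foldl (fun s ln => s.add (pvKey fl.1 ln)) s) s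
        else s) s
      ↔ k ∈ s ∨ ∃ tc ∈ m, tc.1 ≠ tn ∧ k ∈ pvKeys tc.2 := by
  induction m generalizing s with
  | nil => simp
  | cons tc rest ih =>
      simp only [List.foldl_cons]
      by_cases h : tc.1 ≠ tn
      · rw [if_pos h, pv_addloop_eq, ih, pv_mem_foldl_add]
        constructor
        · rintro ((hs | hkk) | ⟨tc', htc', hne, hm⟩)
          exacts [Or.inl hs, Or.inr ⟨tc, List.mem_cons_self .., h, hkk⟩,
            Or.inr ⟨tc', List.mem_cons_of_mem _ htc', hne, hm⟩]
        · rintro (hs | ⟨tc', htc', hne, hm⟩)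
          · exact Or.inl (Or.inl hs)
          · rcases List.mem_cons.1 htc' with rfl | htc''
            · exact Or.inl (Or.inr hm)
            · exact Or.inr ⟨tc', htc'', hne, hm⟩
      · rw [if_neg h, ih]
        constructor
        · rintro (hs | ⟨tc', htc', hne, hm⟩)
          exacts [Or.inl hs, Or.inr ⟨tc', List.mem_cons_of_mem _ htc', hne, hm⟩]
        · rintro (hs | ⟨tc', htc', hne, hm⟩)
          · exact Or.inl hs
          · rcases List.mem_cons.1 htc' with rfl | htc''
            · exact absurd hne h
            · exact Or.inr ⟨tc', htc'', hne, hm⟩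
  
-- the counter loop over one key list
lemma pv_getD_counter_inner (ks : List String) (d : PySem.Dict String Int) (k : String) :
    (ks.foldl (fun d k' => d.insert k' (d.getD k' 0 + 1)) d).getD k 0
      = d.getD k 0 + (ks.count k : Int) := by
  induction ks generalizing d with
  | nil => simp
  | cons a ks ih =>
      simp only [List.foldl_cons, ih, PySem.Dict.getD_insert, List.count_cons]
      by_cases h : k = a
      · subst h; simp; ring
      · have hba : (a == k) = false := by simpa using Ne.symm h
        simp [h, hba]

-- the whole frequency table
lemma pv_getD_freq (m : List (String × List (String × List Int)))
    (d : PySem.Dict String Int) (k : String) :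
    (m.foldl (fun d tc => (pvKeySet tc.2).foldl (fun d k => d.insert k (d.getD k 0 + 1)) d) d).getD k 0
      = d.getD k 0 + (m.map (fun tc => ((pvKeySet tc.2).count k : Int))).sum := by
  induction m generalizing d with
  | nil => simp
  | cons tc rest ih => simp [ih, pv_getD_counter_inner]; ring

lemma pv_count_keySet (cov : List (String × List Int)) (k : String) :
    (pvKeySet cov).count k = if k ∈ pvKeys cov then 1 else 0 := by
  by_cases h : k ∈ pvKeys cov
  · rw [if_pos h]
    exact List.count_eq_one_of_mem (PySem.Set.nodup_ofList _)
      ((PySem.Set.mem_ofList _ _).2 h)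
  · rw [if_neg h]
    exact List.count_eq_zero_of_not_mem (fun hk => h ((PySem.Set.mem_ofList _ _).1 hk))

lemma pv_sum_nonneg_eq_zero {l : List Int} (h : ∀ x ∈ l, 0 ≤ x) :
    l.sum = 0 ↔ ∀ x ∈ l, x = 0 := by
  induction l with
  | nil => simp
  | cons a l ih =>
      have ha := h a (by simp)
      have hl := fun x hx => h x (List.mem_cons_of_mem _ hx)
      have hs : 0 ≤ l.sum := List.sum_nonneg hl
      simp only [List.sum_cons, List.mem_cons]
      constructor
      · intro h0
        have ha0 : a = 0 := by omega
        have : l.sum = 0 := by omega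
        exact fun x hx => hx.elim (fun e => e ▸ ha0) ((ih hl).1 this x)
      · intro hall
        have : l.sum = 0 := (ih hl).2 (fun x hx => hall x (Or.inr hx))
        simp [hall a (Or.inl rfl), this]

-- split the frequency sum at this test's own entry
lemma pv_sum_split (g : (String × List (String × List Int)) → Int) (tn : String) :
    ∀ (m : List (String × List (String × List Int))), (m.map Prod.fst).Nodup →
    ∀ p ∈ m, p.1 = tn →
    (m.map g).sum = g p + ((m.filter (fun tc => tc.1 ≠ tn)).map g).sum := by
  intro m
  induction m with
  | nil => intro _ p hp; cases hp
  | cons a rest ih =>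
      intro hnd p hp hptn
      simp only [List.map_cons, List.nodup_cons] at hnd
      rcases List.mem_cons.1 hp with rfl | hp'
      · have hfilter : rest.filter (fun tc => tc.1 ≠ tn) = rest := by
          apply List.filter_eq_self.2
          intro tc htc
          have : tc.1 ≠ p.1 := fun e => hnd.1 (e ▸ List.mem_map_of_mem htc)
          simpa using hptn ▸ this
        rw [List.map_cons, List.sum_cons, List.filter_cons_of_neg (by simp [hptn]), hfilter]
      · have hane : a.1 ≠ tn := by
          intro e
          exact hnd.1 ((hptn ▸ e) ▸ List.mem_map_of_mem hp')
        rw [List.map_cons, List.sum_cons, ih hnd.2 p hp' hptn,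
            List.filter_cons_of_pos (by simpa using hane), List.map_cons, List.sum_cons]
        ring


-- ===== MAIN =====
theorem calculate_unique_coverage_py_spec : Claim_equal_calculate_unique_coverage_py := by
  intro tn m _ hpre
  unfold Pre_calculate_unique_coverage_py at hpre
  unfold Spec_calculate_unique_coverage_py
  unfold calculate_unique_coverage_py calculate_unique_coverage_py_alt
  cases hget : (PySem.Dict.mk m).get? tn with
  | none => rfl
  | some cov =>
    -- the entry found by get? is in the list, with key tn and value cov
    obtain ⟨p, hfind, hpv⟩ : ∃ p, List.find? (fun q => q.1 == tn) m = some p ∧ p.2 = cov := by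
      simpa [PySem.Dict.get?] using hget
    have hpmem : p ∈ m := List.mem_of_find?_eq_some hfind
    have hptn : p.1 = tn := by simpa using List.find?_some hfind
    simp only []
    -- A's test_lines is B's pvKeySet cov
    rw [pv_addloop_eq]
    -- name B's frequency table and A's other_lines
    set freq : PySem.Dict String Int :=
      m.foldl (fun d tc => (pvKeySet tc.2).foldl (fun d k => d.insert k (d.getD k 0 + 1)) d)
        PySem.Dict.empty with hfreq
    set OL : PySem.Set String :=
      m.foldl (fun s tc =>
        if tc.1 ≠ tn then
          tc.2.foldl (fun s fl => fl.2.foldl (fun s ln => s.add (pvKey fl.1 ln)) s) s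
        else s) PySem.Set.empty with hOL
    -- pointwise agreement of the two filters on pvKeySet cov
    have key : ∀ k ∈ pvKeySet cov,
        (!(OL.contains k)) = (freq.getD k 0 == 1) := by
      intro k hk
      have hkK : k ∈ pvKeys cov := (PySem.Set.mem_ofList _ _).1 hk
      have hgp : ((pvKeySet p.2).count k : Int) = 1 := by
        rw [hpv, pv_count_keySet, if_pos hkK]; rfl
      have hsplit : freq.getD k 0
          = 1 + ((m.filter (fun tc => tc.1 ≠ tn)).map
              (fun tc => ((pvKeySet tc.2).count k : Int))).sum := by
        rw [hfreq, pv_getD_freq,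
            pv_sum_split (fun tc => ((pvKeySet tc.2).count k : Int)) tn m hpre p hpmem hptn, hgp]
        simp [PySem.Dict.getD, PySem.Dict.get?, PySem.Dict.empty]
      have hnn : ∀ x ∈ (m.filter (fun tc => tc.1 ≠ tn)).map
          (fun tc => ((pvKeySet tc.2).count k : Int)), (0:Int) ≤ x := by
        intro x hx
        obtain ⟨tc, -, rfl⟩ := List.mem_map.1 hx
        exact Int.natCast_nonneg _
      have hmem : k ∈ OL ↔ ∃ tc ∈ m, tc.1 ≠ tn ∧ k ∈ pvKeys tc.2 := by
        rw [hOL, pv_mem_other]; simp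
      have hchain : (freq.getD k 0 == 1) = true ↔ ¬ k ∈ OL := by
        rw [beq_iff_eq, hsplit, hmem]
        have hsnn : (0:Int) ≤ ((m.filter (fun tc => tc.1 ≠ tn)).map
            (fun tc => ((pvKeySet tc.2).count k : Int))).sum := List.sum_nonneg hnn
        constructor
        · intro h1 ⟨tc, htc, hne, hkm⟩
          have h0 : ((m.filter (fun tc => tc.1 ≠ tn)).map
              (fun tc => ((pvKeySet tc.2).count k : Int))).sum = 0 := by omega
          have := (pv_sum_nonneg_eq_zero hnn).1 h0
              (((pvKeySet tc.2).count k : Int))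
              (List.mem_map_of_mem (List.mem_filter.2 ⟨htc, by simpa using hne⟩))
          rw [pv_count_keySet, if_pos hkm] at this
          exact absurd this (by norm_num)
        · intro hno
          have h0 : ((m.filter (fun tc => tc.1 ≠ tn)).map
              (fun tc => ((pvKeySet tc.2).count k : Int))).sum = 0 := by
            apply (pv_sum_nonneg_eq_zero hnn).2
            intro x hx
            obtain ⟨tc, htc, rfl⟩ := List.mem_map.1 hx
            obtain ⟨htcm, hne⟩ := List.mem_filter.1 htc
            have hne' : tc.1 ≠ tn := by simpa using hne
            rw [pv_count_keySet, if_neg (fun hkm => hno ⟨tc, htcm, hne', hkm⟩)]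
            rfl
          omega
      apply Bool.eq_iff_iff.mpr
      rw [Bool.not_eq_true', ← Bool.not_eq_true]
      rw [hchain]
      constructor
      · intro hnc hc; exact hnc (by simpa [PySem.Set.contains, List.elem_iff] using hc)
      · intro hnm hc; exact hnm (by simpa [PySem.Set.contains, List.elem_iff] using hc)
    have hlen : (List.filter (fun x => !(OL.contains x)) (pvKeySet cov)).length
        = List.countP (fun k => freq.getD k 0 == 1) (pvKeySet cov) := by
      rw [List.countP_eq_length_filter, List.filter_congr key]
    simp only [PySem.Set.len, PySem.Set.diff, PySem.Set.contains]
    exact_mod_cast hlen
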